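-- pv_equiv track=rewrite | github.com/algnor/mapart-generator | new-old/export.py | _solver_name_to_mc
-- ===== SOURCE A (Python) =====
-- def _solver_name_to_mc(n: str) -> str:
--     for block_type in ("concrete", "wool", "terracotta"):
--         if n.startswith(block_type + "_"):
--             color = n[len(block_type) + 1:]
--             return f"minecraft:{color}_{block_type}"
--     direct = {
--         "snow_block":   "minecraft:snow_block",
--         "clay":         "minecraft:clay",
--         "dirt":         "minecraft:dirt",
--         "stone":        "minecraft:stone",
--         "sand":         "minecraft:sand",
--         "oak_log":      "minecraft:oak_log",
--         "cobblestone":  "minecraft:cobblestone",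
--         "stone_bricks": "minecraft:stone_bricks",
--         "deepslate":    "minecraft:deepslate",
--         "blackstone":   "minecraft:blackstone",
--         "basalt":       "minecraft:basalt",
--         "netherrack":   "minecraft:netherrack",
--         "nether_bricks":"minecraft:nether_bricks",
--         "quartz_block": "minecraft:quartz_block",
--         "calcite":      "minecraft:calcite",
--     }
--     return direct.get(n, f"minecraft:{n}")
-- ===== SOURCE B (Python) =====
-- def _solver_name_to_mc(n: str) -> str:
--     prefix, sep, color = n.partition("_")
--     if sep and prefix in ("concrete", "wool", "terracotta"):
--         return f"minecraft:{color}_{prefix}"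
--     return f"minecraft:{n}"
-- ===== Notes on version B (the rewrite author's own statement) =====
-- stated objective: simpler
-- what changed: Replaced the three-iteration startswith loop and the fully redundant literal dict (every entry maps k to 'minecraft:'+k, same as the fallback) with a single partition('_') plus one membership test.
import Mathlib
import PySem

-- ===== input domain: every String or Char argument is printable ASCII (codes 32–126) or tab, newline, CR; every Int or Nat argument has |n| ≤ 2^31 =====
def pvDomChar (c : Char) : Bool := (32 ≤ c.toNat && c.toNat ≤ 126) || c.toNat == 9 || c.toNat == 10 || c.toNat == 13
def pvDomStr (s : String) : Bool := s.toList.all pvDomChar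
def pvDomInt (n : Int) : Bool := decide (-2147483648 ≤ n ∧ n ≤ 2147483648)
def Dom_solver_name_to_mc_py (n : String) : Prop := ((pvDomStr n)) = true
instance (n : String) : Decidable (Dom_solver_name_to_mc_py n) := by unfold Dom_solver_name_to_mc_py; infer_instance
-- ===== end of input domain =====

-- B replaces A's three-iteration startswith loop and its literal fallback dict (every entry maps k to "minecraft:"+k,
-- exactly the default) by a single partition at the first "_" plus one membership test (objective: simpler).

-- ===== PORT A =====
-- the loop 'for block_type in ("concrete","wool","terracotta")', returning on the first startswith match
def pvALoop (n : String) : List String → Option String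
  | [] => none
  | bt :: rest =>
    if PySem.Str.startswith n (bt ++ "_") then
      -- color = n[len(block_type)+1:]
      some ("minecraft:" ++ PySem.Str.slice n (some (PySem.Str.len bt + 1)) none ++ "_" ++ bt)
    else pvALoop n rest

def pvDirect : PySem.Dict String String :=
  PySem.Dict.ofList
    [("snow_block", "minecraft:snow_block"), ("clay", "minecraft:clay"),
     ("dirt", "minecraft:dirt"), ("stone", "minecraft:stone"),
     ("sand", "minecraft:sand"), ("oak_log", "minecraft:oak_log"),
     ("cobblestone", "minecraft:cobblestone"), ("stone_bricks", "minecraft:stone_bricks"),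
     ("deepslate", "minecraft:deepslate"), ("blackstone", "minecraft:blackstone"),
     ("basalt", "minecraft:basalt"), ("netherrack", "minecraft:netherrack"),
     ("nether_bricks", "minecraft:nether_bricks"), ("quartz_block", "minecraft:quartz_block"),
     ("calcite", "minecraft:calcite")]

def solver_name_to_mc_py (n : String) : String :=
  match pvALoop n ["concrete", "wool", "terracotta"] with
  | some r => r
  | none => PySem.Dict.getD pvDirect n ("minecraft:" ++ n)

-- ===== PORT B =====
-- n.partition("_") for the one-character separator "_" is exactly the span of the char list at the
-- first '_' (exact: prefix = takeWhile (· ≠ '_'); the rest, if nonempty, is '_' :: color, else sep == "").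
def solver_name_to_mc_py_alt (n : String) : String :=
  match n.toList.dropWhile (· ≠ '_') with
  | [] => "minecraft:" ++ n          -- sep == "" : no underscore in n
  | _ :: color =>
    let pre := String.ofList (n.toList.takeWhile (· ≠ '_'))
    if pre = "concrete" ∨ pre = "wool" ∨ pre = "terracotta" then
      "minecraft:" ++ String.ofList color ++ "_" ++ pre
    else "minecraft:" ++ n

-- ===== PRECONDITION & SPEC =====
def Spec_solver_name_to_mc_py (n : String) (out : String) : Prop := out = solver_name_to_mc_py_alt n
instance (n : String) (out : String) : Decidable (Spec_solver_name_to_mc_py n out) := by unfold Spec_solver_name_to_mc_py; infer_instance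

-- ===== CLAIM (what is proved, stated in full; the proofs are below) =====
def Claim_equal_solver_name_to_mc_py : Prop := ∀ (n : String), Dom_solver_name_to_mc_py n → Spec_solver_name_to_mc_py n (solver_name_to_mc_py n)

-- ===== LEMMAS AND PROOFS =====

-- A's fallback dict is redundant: every entry's value is "minecraft:" ++ its key.
lemma pvDirect_getD (n : String) : PySem.Dict.getD pvDirect n ("minecraft:" ++ n) = "minecraft:" ++ n := by
  by_cases h : pvDirect.contains n = false
  · rw [PySem.Dict.getD_of_not_contains]; exact h
  · have hn : n ∈ PySem.Dict.keys pvDirect := by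
      rw [← PySem.Dict.contains_iff_mem_keys]; simpa using h
    have hk : PySem.Dict.keys pvDirect =
      ["snow_block", "clay", "dirt", "stone", "sand", "oak_log", "cobblestone", "stone_bricks",
       "deepslate", "blackstone", "basalt", "netherrack", "nether_bricks", "quartz_block",
       "calcite"] := by rfl
    rw [hk] at hn
    simp only [List.mem_cons, List.not_mem_nil, or_false] at hn
    rcases hn with rfl | rfl | rfl | rfl | rfl | rfl | rfl | rfl | rfl | rfl | rfl | rfl | rfl | rfl | rfl <;> rfl

lemma pv_takeWhile_split (p r : List Char) (hp : '_' ∉ p) :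
    (p ++ '_' :: r).takeWhile (· ≠ '_') = p := by
  induction p with
  | nil => simp
  | cons a as ih =>
    have ha : a ≠ '_' := fun h => hp (by simp [h])
    rw [List.cons_append, List.takeWhile_cons_of_pos (by simpa using ha),
      ih (fun h => hp (by simp [h]))]

lemma pv_startswith_false (n bt : String) (hm : n.toList.dropWhile (· ≠ '_') = []) :
    PySem.Str.startswith n (bt ++ "_") = false := by
  rw [List.dropWhile_eq_nil_iff] at hm
  rw [← Bool.not_eq_true, PySem.Str.startswith_eq, PySem.Chars.startswith_iff]
  rintro ⟨r, hr⟩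
  have hmem : '_' ∈ n.toList := by
    rw [← hr]; simp
  have := hm _ hmem
  simp at this

lemma pv_startswith_iff (n bt : String) (t : List Char) (hbt : '_' ∉ bt.toList)
    (hm : n.toList.dropWhile (· ≠ '_') = '_' :: t) :
    (PySem.Str.startswith n (bt ++ "_") = true ↔
      String.ofList (n.toList.takeWhile (· ≠ '_')) = bt) := by
  have hsplit : n.toList = n.toList.takeWhile (· ≠ '_') ++ '_' :: t := by
    conv_lhs => rw [← List.takeWhile_append_dropWhile (p := (· ≠ '_')) (l := n.toList)]
    rw [hm]
  rw [PySem.Str.startswith_eq, PySem.Chars.startswith_iff]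
  constructor
  · rintro ⟨r, hr⟩
    have hr' : n.toList = bt.toList ++ '_' :: r := by
      rw [← hr]; simp
    have : n.toList.takeWhile (· ≠ '_') = bt.toList := by
      rw [hr', pv_takeWhile_split _ _ hbt]
    rw [this]
    simp
  · intro h
    have hpl : n.toList.takeWhile (· ≠ '_') = bt.toList := by
      rw [← h]; simp
    refine ⟨t, ?_⟩
    rw [hsplit, hpl]
    simp

lemma pv_slice_val (n bt : String) (t : List Char) (h : n.toList = bt.toList ++ '_' :: t) :
    PySem.Str.slice n (some (PySem.Str.len bt + 1)) none = String.ofList t := by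
  have hlen : PySem.Str.len bt + 1 = ((bt.toList.length + 1 : Nat) : Int) := by
    simp [PySem.Str.len_eq]
  have hdrop : (bt.toList ++ '_' :: t).drop (bt.toList.length + 1) = t := by
    have : bt.toList ++ '_' :: t = (bt.toList ++ ['_']) ++ t := by simp
    rw [this]
    have hl : bt.toList.length + 1 = (bt.toList ++ ['_']).length := by simp
    rw [hl, List.drop_left]
  rw [hlen]
  simp only [PySem.Str.slice, PySem.Chars.slice_eq_listSlice]
  rw [PySem.List.slice_from_natCast, h, hdrop]

theorem solver_name_to_mc_py_spec : Claim_equal_solver_name_to_mc_py := by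
  intro n _
  unfold Spec_solver_name_to_mc_py solver_name_to_mc_py solver_name_to_mc_py_alt
  cases hm : n.toList.dropWhile (· ≠ '_') with
  | nil =>
    simp only [pvALoop, pv_startswith_false n _ hm, Bool.false_eq_true, if_false]
    rw [pvDirect_getD]
  | cons c t =>
    have hc : c = '_' := by
      have hh := List.head?_dropWhile_not (· ≠ '_') n.toList
      rw [hm] at hh
      simpa using hh
    subst hc
    have hsplit : n.toList = n.toList.takeWhile (· ≠ '_') ++ '_' :: t := by
      conv_lhs => rw [← List.takeWhile_append_dropWhile (p := (· ≠ '_')) (l := n.toList)]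
      rw [hm]
    have hcon := pv_startswith_iff n "concrete" t (by decide) hm
    have hwool := pv_startswith_iff n "wool" t (by decide) hm
    have hter := pv_startswith_iff n "terracotta" t (by decide) hm
    by_cases h1 : String.ofList (n.toList.takeWhile (· ≠ '_')) = "concrete"
    · have hA : PySem.Str.startswith n ("concrete" ++ "_") = true := hcon.mpr h1
      have hsp : n.toList = "concrete".toList ++ '_' :: t := by
        rw [hsplit]
        congr 1
        have := congrArg String.toList h1
        simpa using this
      simp only [pvALoop, hA, pv_slice_val n "concrete" t hsp, h1, true_or, if_pos]
    · by_cases h2 : String.ofList (n.toList.takeWhile (· ≠ '_')) = "wool"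
      · have hA1 : PySem.Str.startswith n ("concrete" ++ "_") = false := by
          rw [← Bool.not_eq_true, hcon]; exact h1
        have hA : PySem.Str.startswith n ("wool" ++ "_") = true := hwool.mpr h2
        have hsp : n.toList = "wool".toList ++ '_' :: t := by
          rw [hsplit]
          congr 1
          have := congrArg String.toList h2
          simpa using this
        simp only [pvALoop, hA1, hA, Bool.false_eq_true, if_false, if_true,
          pv_slice_val n "wool" t hsp, h2]
        simp
      · by_cases h3 : String.ofList (n.toList.takeWhile (· ≠ '_')) = "terracotta"
        · have hA1 : PySem.Str.startswith n ("concrete" ++ "_") = false := by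
            rw [← Bool.not_eq_true, hcon]; exact h1
          have hA2 : PySem.Str.startswith n ("wool" ++ "_") = false := by
            rw [← Bool.not_eq_true, hwool]; exact h2
          have hA : PySem.Str.startswith n ("terracotta" ++ "_") = true := hter.mpr h3
          have hsp : n.toList = "terracotta".toList ++ '_' :: t := by
            rw [hsplit]
            congr 1
            have := congrArg String.toList h3
            simpa using this
          simp only [pvALoop, hA1, hA2, hA, Bool.false_eq_true, if_false, if_true,
            pv_slice_val n "terracotta" t hsp, h3]
          simp
        · have hA1 : PySem.Str.startswith n ("concrete" ++ "_") = false := by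
            rw [← Bool.not_eq_true, hcon]; exact h1
          have hA2 : PySem.Str.startswith n ("wool" ++ "_") = false := by
            rw [← Bool.not_eq_true, hwool]; exact h2
          have hA3 : PySem.Str.startswith n ("terracotta" ++ "_") = false := by
            rw [← Bool.not_eq_true, hter]; exact h3
          simp only [pvALoop, hA1, hA2, hA3, Bool.false_eq_true, if_false]
          rw [pvDirect_getD]
          split_ifs with hC
          · rcases hC with hc | hc | hc
            · exact absurd (by simpa using hc) h1
            · exact absurd (by simpa using hc) h2
            · exact absurd (by simpa using hc) h3
          · rfl
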